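-- pv_equiv track=rewrite | github.com/ynulihao/LLMRouterBench | baselines/adaptors/routerembedding_stats.py | _estimate_pairs_for_group
-- ===== SOURCE A (Python) =====
-- def _estimate_pairs_for_group(group_size: int, max_pos: int) -> int:
--     """
--     Mirror adaptor's per-group pairing strategy with cap per anchor.
--     """
--     if max_pos <= 0 or group_size < 2:
--         return 0
--
--     total_pairs = 0
--     for i in range(group_size - 1):
--         remaining = group_size - i - 1
--         total_pairs += min(max_pos, remaining)
--
--     return total_pairs
-- ===== SOURCE B (Python) =====
-- def _estimate_pairs_for_group(group_size: int, max_pos: int) -> int: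
--     # Closed form: remaining counts are group_size-1 down to 1; capped at max_pos
--     # this is max_pos copies of the cap plus the triangle below it.
--     if max_pos <= 0 or group_size < 2:
--         return 0
--     n = group_size - 1
--     k = min(max_pos, n)
--     return k * (k + 1) // 2 + k * (n - k)
-- ===== Notes on version B (the rewrite author's own statement) =====
-- stated objective: faster
-- what changed: Replaces the O(group_size) loop summing min(max_pos, remaining) with an O(1) closed form: triangular number of the capped part plus cap times the flat part.
import Mathlib
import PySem

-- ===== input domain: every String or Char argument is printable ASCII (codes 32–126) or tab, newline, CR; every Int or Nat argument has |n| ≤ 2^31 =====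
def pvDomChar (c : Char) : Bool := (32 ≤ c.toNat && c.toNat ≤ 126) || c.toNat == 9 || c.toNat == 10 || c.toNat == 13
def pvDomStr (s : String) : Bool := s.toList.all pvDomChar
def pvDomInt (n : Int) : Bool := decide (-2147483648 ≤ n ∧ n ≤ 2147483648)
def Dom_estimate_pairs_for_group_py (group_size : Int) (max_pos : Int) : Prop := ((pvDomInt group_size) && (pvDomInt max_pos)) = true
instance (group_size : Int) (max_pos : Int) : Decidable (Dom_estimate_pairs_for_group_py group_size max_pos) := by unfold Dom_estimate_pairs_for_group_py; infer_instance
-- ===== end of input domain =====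

-- B replaces A's summation loop with a closed form (triangle part plus flat capped part); objective: faster.

-- ===== PORT A =====
def estimate_pairs_for_group_py (group_size : Int) (max_pos : Int) : Int :=
  if max_pos ≤ 0 ∨ group_size < 2 then 0
  else
    (PySem.List.pyRange 0 (group_size - 1) 1).foldl
      (fun total_pairs i => total_pairs + min max_pos (group_size - i - 1)) 0

-- ===== PORT B =====
def estimate_pairs_for_group_py_alt (group_size : Int) (max_pos : Int) : Int :=
  if max_pos ≤ 0 ∨ group_size < 2 then 0
  else
    let n := group_size - 1
    let k := min max_pos n
    PySem.Int.floordiv (k * (k + 1)) 2 + k * (n - k)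

-- ===== PRECONDITION & SPEC =====
def Spec_estimate_pairs_for_group_py (group_size : Int) (max_pos : Int) (out : Int) : Prop := out = estimate_pairs_for_group_py_alt group_size max_pos
instance (group_size : Int) (max_pos : Int) (out : Int) : Decidable (Spec_estimate_pairs_for_group_py group_size max_pos out) := by unfold Spec_estimate_pairs_for_group_py; infer_instance

-- ===== CLAIM (what is proved, stated in full; the proofs are below) =====
def Claim_equal_estimate_pairs_for_group_py : Prop := ∀ (group_size : Int) (max_pos : Int), Dom_estimate_pairs_for_group_py group_size max_pos → Spec_estimate_pairs_for_group_py group_size max_pos (estimate_pairs_for_group_py group_size max_pos)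

-- ===== LEMMAS AND PROOFS =====

-- triangular number r*(r+1)/2 and its step
def pvTri (r : Int) : Int := r * (r + 1) / 2

theorem pvTri_succ (r : Int) : pvTri (r + 1) = pvTri r + (r + 1) := by
  unfold pvTri
  rw [show (r + 1) * (r + 1 + 1) = r * (r + 1) + (r + 1) * 2 by ring,
      Int.add_mul_ediv_right _ _ (by norm_num : (2:Int) ≠ 0)]

-- A's loop from index a to b sums min m (b - i); closed form in terms of b - a.
theorem pv_loop_eq (m : Int) (hm : 1 ≤ m) : ∀ (c : Nat) (a init b : Int), b - a = (c : Int) →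
    (PySem.List.pyRange a b 1).foldl (fun acc i => acc + min m (b - i)) init
      = init + pvTri (min m (b - a)) + min m (b - a) * ((b - a) - min m (b - a)) := by
  intro c
  induction c with
  | zero =>
    intro a init b hba
    rw [PySem.List.pyRange_one_eq_nil (by omega)]
    have h0 : min m (b - a) = 0 := by rw [hba]; simp; omega
    simp [h0, pvTri]
  | succ p ih =>
    intro a init b hba
    have hp : (0:Int) ≤ (p:Int) := by positivity
    rw [PySem.List.pyRange_one_cons (by omega), List.foldl_cons,
        ih (a + 1) (init + min m (b - a)) b (by push_cast at hba ⊢; omega)]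
    rcases le_or_gt m (b - (a + 1)) with h' | h'
    · rw [min_eq_left (by omega), min_eq_left h']
      have e1 : m * (b - (a + 1) - m) = m * (b - a - m) - m := by ring
      rw [e1]; ring
    · rcases le_or_gt m (b - a) with h | h
      · -- m = b - a - 1 is excluded by h', so b - a ≤ m ≤ b - a, i.e. m = b - a
        have hme : m = b - a := by omega
        rw [min_eq_left h, min_eq_right (by omega), hme,
            show b - a = (b - (a + 1)) + 1 by ring, pvTri_succ]
        ring
      · rw [min_eq_right h.le, min_eq_right (by omega),
            show b - a = (b - (a + 1)) + 1 by ring, pvTri_succ]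
        ring

-- ===== VERDICT (by name: the statement is the Claim_ definition above) =====
theorem estimate_pairs_for_group_py_spec : Claim_equal_estimate_pairs_for_group_py := by
  intro g m _
  unfold Spec_estimate_pairs_for_group_py estimate_pairs_for_group_py estimate_pairs_for_group_py_alt
  by_cases hguard : m ≤ 0 ∨ g < 2
  · rw [if_pos hguard, if_pos hguard]
  · rw [if_neg hguard, if_neg hguard]
    rw [not_or, not_le, not_lt] at hguard
    obtain ⟨hm, hg⟩ := hguard
    have hbody : (fun (acc i : Int) => acc + min m (g - i - 1))
        = fun (acc i : Int) => acc + min m ((g - 1) - i) := by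
      funext acc i; rw [sub_right_comm]
    rw [hbody, pv_loop_eq m (by omega) (g - 1).toNat 0 0 (g - 1) (by omega)]
    unfold pvTri
    show _ = PySem.Int.floordiv (min m (g - 1) * (min m (g - 1) + 1)) 2
        + min m (g - 1) * ((g - 1) - min m (g - 1))
    rw [PySem.Int.floordiv_eq_ediv_of_pos (by norm_num)]
    simp
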